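-- pv_equiv track=rewrite | github.com/LukhasAI/Lukhas | tools/automation/pytest_class_fixer.py | fallback_string_replacement
-- ===== SOURCE A (Python) =====
-- def fallback_string_replacement(content: str) -> str:
--     """Fallback method using string replacement for older Python versions"""
--     # Simple regex-based replacement of __init__ with setup_method in test classes
--     lines = content.split("\n")
--     new_lines = []
--     in_test_class = False
--     class_indent = 0
--
--     for line in lines:
--         stripped = line.lstrip()
--         current_indent = len(line) - len(stripped)
--
--         # Check if we're entering a test class
--         if stripped.startswith("class Test") and ":" in stripped:
--             in_test_class = True
--             class_indent = current_indent
--             new_lines.append(line)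
--             continue
--
--         # Check if we're leaving the test class
--         if (in_test_class and current_indent <= class_indent and stripped and (not stripped.startswith('#'))) and (not stripped.startswith('def ') and (not stripped.startswith('@'))):
--             in_test_class = False
--
--         # Replace __init__ with setup_method in test classes
--         if in_test_class and stripped.startswith("def __init__(self"):
--             new_line = line.replace("__init__", "setup_method")
--             new_lines.append(new_line)
--         else:
--             new_lines.append(line)
--
--     return "\n".join(new_lines)
-- ===== SOURCE B (Python) =====
-- def fallback_string_replacement(content: str) -> str:
--     """Two-pass rewrite: first mark the lines lying inside a Test class, then emit."""
--     lines = content.split("\n")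
--     # Pass 1: flag per line — is this line inside a test class (and not the class header)?
--     flags = []
--     in_cls = False
--     cls_indent = 0
--     for line in lines:
--         s = line.lstrip()
--         ci = len(line) - len(s)
--         if s.startswith("class Test") and ":" in s:
--             in_cls, cls_indent = True, ci
--             flags.append(False)
--             continue
--         if (in_cls and ci <= cls_indent and s and not s.startswith('#')
--                 and not s.startswith('def ') and not s.startswith('@')):
--             in_cls = False
--         flags.append(in_cls)
--     # Pass 2: rewrite exactly the flagged __init__ definitions.
--     return "\n".join(
--         line.replace("__init__", "setup_method")
--         if f and line.lstrip().startswith("def __init__(self") else line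
--         for line, f in zip(lines, flags))
-- ===== Notes on version B (the rewrite author's own statement) =====
-- stated objective: alternative
-- what changed: Separates region detection from rewriting: a first pass builds a per-line boolean flag list marking lines inside a Test class, a second pass zips lines with flags and rewrites only flagged def __init__(self lines, instead of A's single stateful loop that appends while tracking state.
import Mathlib
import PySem

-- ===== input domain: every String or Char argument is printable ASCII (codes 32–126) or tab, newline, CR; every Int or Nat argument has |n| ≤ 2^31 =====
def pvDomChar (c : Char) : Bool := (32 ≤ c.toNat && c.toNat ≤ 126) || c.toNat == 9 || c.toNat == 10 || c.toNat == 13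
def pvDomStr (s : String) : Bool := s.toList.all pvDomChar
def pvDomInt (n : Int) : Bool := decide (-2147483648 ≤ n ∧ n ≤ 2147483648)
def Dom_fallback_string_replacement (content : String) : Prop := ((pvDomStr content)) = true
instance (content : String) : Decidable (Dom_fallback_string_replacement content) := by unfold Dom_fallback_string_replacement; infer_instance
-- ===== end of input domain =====

-- B replaces A's single stateful append-loop by two passes (flag list, then zip+rewrite); same cost, alternative decomposition.

-- ===== PORT A =====
-- one iteration of A's for-loop: state = (new_lines, in_test_class, class_indent)
def pvAStep (st : List String × Bool × Int) (line : String) : List String × Bool × Int :=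
  let stripped := PySem.Str.lstrip line
  let cur : Int := PySem.Str.len line - PySem.Str.len stripped
  if PySem.Str.startswith stripped "class Test" && PySem.Str.isIn ":" stripped then
    (st.1 ++ [line], true, cur)
  else
    let inCls := if st.2.1 && decide (cur ≤ st.2.2) && !(stripped == "")
                    && !(PySem.Str.startswith stripped "#")
                    && !(PySem.Str.startswith stripped "def ")
                    && !(PySem.Str.startswith stripped "@") then false else st.2.1
    if inCls && PySem.Str.startswith stripped "def __init__(self" then
      (st.1 ++ [PySem.Str.replace line "__init__" "setup_method"], inCls, st.2.2)
    else
      (st.1 ++ [line], inCls, st.2.2)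

def fallback_string_replacement (content : String) : String :=
  let lines := (PySem.Str.split? content "\n").getD []
  PySem.Str.join "\n" ((lines.foldl pvAStep ([], false, 0)).1)

-- ===== PORT B =====
-- pass 1 of B: the per-line flags, state-passing over (in_cls, cls_indent)
def pvBFlags : List String → Bool → Int → List Bool
  | [], _, _ => []
  | line :: rest, inCls, ind =>
    let s := PySem.Str.lstrip line
    let ci : Int := PySem.Str.len line - PySem.Str.len s
    if PySem.Str.startswith s "class Test" && PySem.Str.isIn ":" s then
      false :: pvBFlags rest true ci
    else
      let inCls' := if inCls && decide (ci ≤ ind) && !(s == "")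
                       && !(PySem.Str.startswith s "#")
                       && !(PySem.Str.startswith s "def ")
                       && !(PySem.Str.startswith s "@") then false else inCls
      inCls' :: pvBFlags rest inCls' ind

-- pass 2 of B: the rewrite applied to one (line, flag) pair
def pvBEmit (p : String × Bool) : String :=
  if p.2 && PySem.Str.startswith (PySem.Str.lstrip p.1) "def __init__(self" then
    PySem.Str.replace p.1 "__init__" "setup_method"
  else p.1

def fallback_string_replacement_alt (content : String) : String :=
  let lines := (PySem.Str.split? content "\n").getD []
  PySem.Str.join "\n" ((lines.zip (pvBFlags lines false 0)).map pvBEmit)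

-- ===== PRECONDITION & SPEC =====
def Spec_fallback_string_replacement (content : String) (out : String) : Prop := out = fallback_string_replacement_alt content
instance (content : String) (out : String) : Decidable (Spec_fallback_string_replacement content out) := by unfold Spec_fallback_string_replacement; infer_instance

-- ===== CLAIM (what is proved, stated in full; the proofs are below) =====
def Claim_equal_fallback_string_replacement : Prop := ∀ (content : String), Dom_fallback_string_replacement content → Spec_fallback_string_replacement content (fallback_string_replacement content)

-- ===== LEMMAS AND PROOFS =====

-- A's fold appends exactly the lines B's two passes emit, from any start state.
lemma pvA_eq_B (lines : List String) : ∀ (acc : List String) (inCls : Bool) (ind : Int),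
    (lines.foldl pvAStep (acc, inCls, ind)).1
      = acc ++ (lines.zip (pvBFlags lines inCls ind)).map pvBEmit := by
  induction lines with
  | nil => intro acc inCls ind; simp [pvBFlags]
  | cons line rest ih =>
    intro acc inCls ind
    by_cases hEnter : (PySem.Str.startswith (PySem.Str.lstrip line) "class Test"
        && PySem.Str.isIn ":" (PySem.Str.lstrip line)) = true
    · simp only [List.foldl_cons, pvAStep, pvBFlags, hEnter, if_true]
      rw [ih]
      simp [pvBEmit]
    · simp only [List.foldl_cons, pvAStep, pvBFlags, hEnter, Bool.false_eq_true, if_false]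
      set inCls' := if inCls && decide ((PySem.Str.len line - PySem.Str.len (PySem.Str.lstrip line)) ≤ ind)
            && !(PySem.Str.lstrip line == "")
            && !(PySem.Str.startswith (PySem.Str.lstrip line) "#")
            && !(PySem.Str.startswith (PySem.Str.lstrip line) "def ")
            && !(PySem.Str.startswith (PySem.Str.lstrip line) "@") then false else inCls with hC
      by_cases hRw : (inCls' && PySem.Str.startswith (PySem.Str.lstrip line) "def __init__(self") = true
      · simp only [hRw, if_true]
        rw [ih]
        simp only [List.zip_cons_cons, List.map_cons, pvBEmit, hRw, if_true]
        simp
      · simp only [hRw, Bool.false_eq_true, if_false]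
        rw [ih]
        simp only [List.zip_cons_cons, List.map_cons, pvBEmit, hRw, Bool.false_eq_true, if_false]
        simp

-- ===== VERDICT (by name: the statement is the Claim_ definition above) =====
theorem fallback_string_replacement_spec : Claim_equal_fallback_string_replacement := by
  intro content _
  unfold Spec_fallback_string_replacement fallback_string_replacement fallback_string_replacement_alt
  simp only []
  rw [pvA_eq_B]
  simp
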